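-- pv_equiv track=rewrite | github.com/hahyuning/Coding-test-study | problem_solving/2022/08/220804/220804_1.py | solution
-- ===== SOURCE A (Python) =====
-- from collections import Counter
--
-- def solution(X, Y):
--     x_list = Counter(X)
--     y_list = Counter(Y)
--
--     common = []
--     for k in x_list.keys():
--         if k in y_list:
--             for i in range(min(x_list[k], y_list[k])):
--                 common.append(k)
--
--     if not common:
--         return "-1"
--
--     if set(common) == {"0"}:
--         return "0"
--
--     common.sort(reverse=True)
--     return "".join(common)
-- ===== SOURCE B (Python) =====
-- from collections import Counter
--
-- def solution(X, Y):
--     # Counting-sort style: emit shared characters directly in descending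
--     # character-code order; no list building + sort.
--     cx = Counter(X)
--     cy = Counter(Y)
--     pieces = []
--     for code in range(126, 8, -1):
--         ch = chr(code)
--         pieces.append(ch * min(cx[ch], cy[ch]))
--     s = "".join(pieces)
--     if not s:
--         return "-1"
--     if s[0] == "0" and s[-1] == "0":
--         return "0"
--     return s
-- ===== Notes on version B (the rewrite author's own statement) =====
-- stated objective: faster
-- what changed: Replaces build-a-common-list-then-sort(reverse) with a counting-sort emission: count both strings once, then walk character codes 126..9 downward emitting min(count) copies of each, so no sort is performed.
import Mathlib
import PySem

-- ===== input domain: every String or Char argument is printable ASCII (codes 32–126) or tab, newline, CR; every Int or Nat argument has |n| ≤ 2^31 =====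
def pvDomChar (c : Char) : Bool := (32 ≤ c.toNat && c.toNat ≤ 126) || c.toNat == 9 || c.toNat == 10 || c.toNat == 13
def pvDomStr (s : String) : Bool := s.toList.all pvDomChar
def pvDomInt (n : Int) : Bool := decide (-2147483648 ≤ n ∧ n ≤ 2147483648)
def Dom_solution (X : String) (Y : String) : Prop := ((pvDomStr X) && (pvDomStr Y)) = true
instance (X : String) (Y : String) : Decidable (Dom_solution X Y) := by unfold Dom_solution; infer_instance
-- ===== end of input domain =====

-- B replaces build-a-common-list-then-sort with a counting-sort emission over descending character codes (no sort).

-- ===== PORT A =====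
def solution (X : String) (Y : String) : String :=
  let x_list := PySem.Dict.counter X.toList
  let y_list := PySem.Dict.counter Y.toList
  let common : List Char := x_list.keys.foldl (fun acc k =>
      if y_list.contains k then
        (PySem.List.pyRange 0 (min (x_list.getD k 0) (y_list.getD k 0)) 1).foldl
          (fun acc2 _ => acc2 ++ [k]) acc
      else acc) []
  if common = [] then "-1"
  else if PySem.Set.equal (PySem.Set.ofList common) (PySem.Set.ofList ['0']) then "0"
  else String.mk (PySem.List.sorted common (fun c => c) true)

-- ===== PORT B =====
def solution_alt (X : String) (Y : String) : String :=
  let cx := PySem.Dict.counter X.toList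
  let cy := PySem.Dict.counter Y.toList
  let s : List Char := (PySem.List.pyRange 126 8 (-1)).foldl (fun acc code =>
      let ch := Char.ofNat code.toNat
      acc ++ PySem.List.pyRepeat [ch] (min (cx.getD ch 0) (cy.getD ch 0))) []
  if s = [] then "-1"
  else if PySem.List.pyGet? s 0 = some '0' ∧ PySem.List.pyGet? s (-1) = some '0' then "0"
  else String.mk s

-- ===== PRECONDITION & SPEC =====
def Spec_solution (X : String) (Y : String) (out : String) : Prop := out = solution_alt X Y
instance (X : String) (Y : String) (out : String) : Decidable (Spec_solution X Y out) := by unfold Spec_solution; infer_instance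

-- ===== CLAIM (what is proved, stated in full; the proofs are below) =====
def Claim_equal_solution : Prop := ∀ (X : String) (Y : String), Dom_solution X Y → Spec_solution X Y (solution X Y)

-- ===== LEMMAS AND PROOFS =====

-- min of the two multiplicities of c: the count of c in the shared multiset
def pvMc (xs ys : List Char) (c : Char) : Nat := min (xs.count c) (ys.count c)

-- the block appended for key k in A's loop
def pvG (xs ys : List Char) (k : Char) : List Char :=
  if (PySem.Dict.counter ys : PySem.Dict Char Int).contains k then List.replicate (pvMc xs ys k) k else []

def pvCommonA (xs ys : List Char) : List Char := (PySem.Set.ofList xs).flatMap (pvG xs ys)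

-- the descending character list chr(126), …, chr(9)
def pvCharlist : List Char := (PySem.List.pyRange 126 8 (-1)).map (fun code => Char.ofNat code.toNat)

def pvListB (xs ys : List Char) : List Char :=
  pvCharlist.flatMap (fun ch => List.replicate (pvMc xs ys ch) ch)

lemma pv_min_toNat (a b : Nat) : (min (a : Int) (b : Int)).toNat = min a b := by omega

lemma pv_char_le_iff (a b : Char) : a ≤ b ↔ a.toNat ≤ b.toNat := by
  rw [Char.le_def, UInt32.le_iff_toNat_le]; rfl

lemma pv_char_toNat_inj {a b : Char} (h : a.toNat = b.toNat) : a = b := by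
  have ha := Char.ofNat_toNat a
  rw [← ha, h, Char.ofNat_toNat]

lemma pvCharlist_nodup : pvCharlist.Nodup := by decide

lemma pvCharlist_sorted : pvCharlist.Pairwise (fun a b => b < a) := by decide

lemma pv_mem_charlist_of_dom {c : Char} (h : pvDomChar c = true) : c ∈ pvCharlist := by
  have h9 : 9 ≤ c.toNat ∧ c.toNat ≤ 126 := by
    unfold pvDomChar at h
    simp only [Bool.or_eq_true, Bool.and_eq_true, decide_eq_true_eq, beq_iff_eq] at h
    omega
  unfold pvCharlist
  refine List.mem_map.mpr ⟨(c.toNat : Int), ?_, ?_⟩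
  · rw [PySem.List.mem_pyRange_neg_one]
    constructor <;> [exact_mod_cast (by omega : (8:Int) < (c.toNat:Int)); exact_mod_cast (by omega : (c.toNat:Int) ≤ 126)]
  · rw [Int.toNat_natCast, Char.ofNat_toNat]

lemma pv_count_flatMap_nodup (g : Char → List Char) (hg : ∀ k x, x ∈ g k → x = k) (v : Char) :
    ∀ l : List Char, l.Nodup → (l.flatMap g).count v = if v ∈ l then (g v).count v else 0 := by
  intro l
  induction l with
  | nil => simp
  | cons k t ih =>
    intro hn
    rcases List.nodup_cons.mp hn with ⟨hk, ht⟩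
    simp only [List.flatMap_cons, List.count_append, ih ht]
    by_cases hv : v = k
    · subst hv; simp [hk]
    · have hz : (g k).count v = 0 := List.count_eq_zero.mpr (fun hm => hv (hg k v hm))
      simp [hz, hv]

lemma pv_count_commonA (xs ys : List Char) (v : Char) :
    (pvCommonA xs ys).count v = pvMc xs ys v := by
  unfold pvCommonA
  rw [pv_count_flatMap_nodup _ (by
        intro k x hm
        unfold pvG at hm
        split at hm
        · exact List.eq_of_mem_replicate hm
        · simp at hm) v _ (PySem.Set.nodup_ofList xs)]
  by_cases hx : v ∈ xs
  · rw [if_pos ((PySem.Set.mem_ofList _ _).mpr hx)]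
    unfold pvG
    by_cases hy : v ∈ ys
    · rw [if_pos (by rw [PySem.Dict.contains_counter]; exact List.contains_iff_mem.mpr hy),
          List.count_replicate_self]
    · rw [if_neg (by rw [PySem.Dict.contains_counter]; simp [hy]), List.count_nil]
      unfold pvMc
      rw [List.count_eq_zero.mpr hy]
      omega
  · rw [if_neg (fun hm => hx ((PySem.Set.mem_ofList _ _).mp hm))]
    unfold pvMc
    rw [List.count_eq_zero.mpr hx]
    omega

lemma pv_count_listB (xs ys : List Char) (hx : ∀ c ∈ xs, pvDomChar c = true) (v : Char) :
    (pvListB xs ys).count v = pvMc xs ys v := by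
  unfold pvListB
  rw [pv_count_flatMap_nodup _ (fun k x hm => List.eq_of_mem_replicate hm) v _ pvCharlist_nodup]
  by_cases hv : v ∈ pvCharlist
  · rw [if_pos hv, List.count_replicate_self]
  · rw [if_neg hv]
    have hvx : v ∉ xs := fun h => hv (pv_mem_charlist_of_dom (hx v h))
    unfold pvMc
    rw [List.count_eq_zero.mpr hvx]
    omega

lemma pv_perm (xs ys : List Char) (hx : ∀ c ∈ xs, pvDomChar c = true) :
    (pvCommonA xs ys).Perm (pvListB xs ys) :=
  List.perm_iff_count.mpr (fun v => by rw [pv_count_commonA, pv_count_listB xs ys hx])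

lemma pv_pairwise_flatMap_replicate (f : Char → Nat) :
    ∀ l : List Char, l.Pairwise (fun a b => b < a) →
      (l.flatMap (fun c => List.replicate (f c) c)).Pairwise (fun a b : Char => b ≤ a) := by
  intro l
  induction l with
  | nil => simp
  | cons c t ih =>
    intro h
    rcases List.pairwise_cons.mp h with ⟨hc, ht⟩
    simp only [List.flatMap_cons]
    rw [List.pairwise_append]
    refine ⟨List.pairwise_replicate.mpr (Or.inr le_rfl), ih ht, ?_⟩
    intro a ha b hb
    rcases List.mem_flatMap.mp hb with ⟨c', hc', hb'⟩
    rw [List.eq_of_mem_replicate ha, List.eq_of_mem_replicate hb']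
    exact le_of_lt (hc c' hc')

lemma pv_pairwise_listB (xs ys : List Char) :
    (pvListB xs ys).Pairwise (fun a b : Char => b ≤ a) :=
  pv_pairwise_flatMap_replicate _ _ pvCharlist_sorted

lemma pv_sorted_eq_listB (xs ys : List Char) (hx : ∀ c ∈ xs, pvDomChar c = true) :
    PySem.List.sorted (pvCommonA xs ys) (fun c => c) true = pvListB xs ys := by
  apply PySem.List.eq_of_perm_of_pairwise_le_of_injective (fun c : Char => -(c.toNat : Int))
  · intro a b hab
    simp only [neg_inj, Nat.cast_inj] at hab
    exact pv_char_toNat_inj hab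
  · exact (PySem.List.sorted_perm _ _ _).trans (pv_perm xs ys hx)
  · exact (PySem.List.sorted_pairwise_rev _ _).imp (fun {a b} h => by
      have := (pv_char_le_iff b a).mp h
      omega)
  · exact (pv_pairwise_listB xs ys).imp (fun {a b} h => by
      have := (pv_char_le_iff b a).mp h
      omega)

-- A's common-building fold computes pvCommonA
lemma pv_common_eq (X Y : String) :
    (PySem.Dict.counter X.toList).keys.foldl (fun acc k =>
      if (PySem.Dict.counter Y.toList : PySem.Dict Char Int).contains k then
        (PySem.List.pyRange 0 (min ((PySem.Dict.counter X.toList : PySem.Dict Char Int).getD k 0)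
            ((PySem.Dict.counter Y.toList : PySem.Dict Char Int).getD k 0)) 1).foldl
          (fun acc2 _ => acc2 ++ [k]) acc
      else acc) [] = pvCommonA X.toList Y.toList := by
  rw [PySem.Dict.keys_counter]
  have hbody : ∀ (acc : List Char) (k : Char),
      (if (PySem.Dict.counter Y.toList : PySem.Dict Char Int).contains k then
        (PySem.List.pyRange 0 (min ((PySem.Dict.counter X.toList : PySem.Dict Char Int).getD k 0)
            ((PySem.Dict.counter Y.toList : PySem.Dict Char Int).getD k 0)) 1).foldl
          (fun acc2 _ => acc2 ++ [k]) acc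
      else acc) = acc ++ pvG X.toList Y.toList k := by
    intro acc k
    unfold pvG
    by_cases h : (PySem.Dict.counter Y.toList : PySem.Dict Char Int).contains k
    · rw [if_pos h, if_pos h]
      rw [PySem.List.foldl_append_singleton_eq_map (f := fun _ => k)]
      rw [List.map_const', PySem.List.length_pyRange_one]
      rw [PySem.Dict.getD_counter, PySem.Dict.getD_counter]
      have hmin : (min ((X.toList.count k : Int)) ((Y.toList.count k : Int)) - 0).toNat
          = pvMc X.toList Y.toList k := by
        unfold pvMc; omega
      rw [hmin]
    · rw [if_neg h, if_neg h, List.append_nil]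
  rw [show (fun (acc : List Char) (k : Char) =>
      if (PySem.Dict.counter Y.toList : PySem.Dict Char Int).contains k then
        (PySem.List.pyRange 0 (min ((PySem.Dict.counter X.toList : PySem.Dict Char Int).getD k 0)
            ((PySem.Dict.counter Y.toList : PySem.Dict Char Int).getD k 0)) 1).foldl
          (fun acc2 _ => acc2 ++ [k]) acc
      else acc) = (fun (acc : List Char) (k : Char) => acc ++ pvG X.toList Y.toList k) from
    funext fun acc => funext fun k => hbody acc k]
  rw [PySem.List.foldl_append_eq_flatMap]
  simp [pvCommonA]

-- B's emission fold computes pvListB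
lemma pv_s_eq (X Y : String) :
    (PySem.List.pyRange 126 8 (-1)).foldl (fun acc code =>
      acc ++ PySem.List.pyRepeat [Char.ofNat code.toNat]
        (min ((PySem.Dict.counter X.toList : PySem.Dict Char Int).getD (Char.ofNat code.toNat) 0)
             ((PySem.Dict.counter Y.toList : PySem.Dict Char Int).getD (Char.ofNat code.toNat) 0))) []
    = pvListB X.toList Y.toList := by
  have hbody : ∀ (acc : List Char) (code : Int),
      (acc ++ PySem.List.pyRepeat [Char.ofNat code.toNat]
        (min ((PySem.Dict.counter X.toList : PySem.Dict Char Int).getD (Char.ofNat code.toNat) 0)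
             ((PySem.Dict.counter Y.toList : PySem.Dict Char Int).getD (Char.ofNat code.toNat) 0)))
      = acc ++ List.replicate (pvMc X.toList Y.toList (Char.ofNat code.toNat)) (Char.ofNat code.toNat) := by
    intro acc code
    rw [PySem.List.pyRepeat_singleton, PySem.Dict.getD_counter, PySem.Dict.getD_counter, pv_min_toNat]
    rfl
  rw [show (fun (acc : List Char) (code : Int) =>
      acc ++ PySem.List.pyRepeat [Char.ofNat code.toNat]
        (min ((PySem.Dict.counter X.toList : PySem.Dict Char Int).getD (Char.ofNat code.toNat) 0)
             ((PySem.Dict.counter Y.toList : PySem.Dict Char Int).getD (Char.ofNat code.toNat) 0))) =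
      (fun (acc : List Char) (code : Int) =>
        acc ++ List.replicate (pvMc X.toList Y.toList (Char.ofNat code.toNat)) (Char.ofNat code.toNat)) from
    funext fun acc => funext fun code => hbody acc code]
  rw [PySem.List.foldl_append_eq_flatMap]
  unfold pvListB pvCharlist
  rw [List.flatMap_map]
  rfl

lemma pv_pyGet?_zero {s : List Char} (h : s ≠ []) :
    PySem.List.pyGet? s 0 = some (s[0]'(List.length_pos_of_ne_nil h)) := by
  have hl : 0 < s.length := List.length_pos_of_ne_nil h
  simp [PySem.List.pyGet?, PySem.List.pyIdx?, hl]

lemma pv_pyGet?_neg_one {s : List Char} (h : s ≠ []) :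
    PySem.List.pyGet? s (-1) = some (s[s.length - 1]'(by have := List.length_pos_of_ne_nil h; omega)) := by
  have hl : 0 < s.length := List.length_pos_of_ne_nil h
  simp only [PySem.List.pyGet?, PySem.List.pyIdx?]
  rw [if_neg (by omega), if_pos (by exact_mod_cast (by omega : -(s.length : Int) ≤ -1))]
  simp

-- the membership/sortedness characterisation of B's two-ended '0' test
lemma pv_allzero_iff (xs ys : List Char) (hx : ∀ c ∈ xs, pvDomChar c = true)
    (hne : pvCommonA xs ys ≠ []) :
    (PySem.Set.equal (PySem.Set.ofList (pvCommonA xs ys)) (PySem.Set.ofList ['0']) = true)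
    ↔ (PySem.List.pyGet? (pvListB xs ys) 0 = some '0' ∧
       PySem.List.pyGet? (pvListB xs ys) (-1) = some '0') := by
  have hperm := pv_perm xs ys hx
  have hsne : pvListB xs ys ≠ [] := by
    intro e
    exact hne (List.length_eq_zero_iff.mp (by rw [hperm.length_eq, e]; rfl))
  have hlp : 0 < (pvListB xs ys).length := List.length_pos_of_ne_nil hsne
  have hpw := List.pairwise_iff_getElem.mp (pv_pairwise_listB xs ys)
  constructor
  · intro hz
    have hall : ∀ x ∈ pvCommonA xs ys, x = '0' := by
      intro x hm
      have := (PySem.Set.equal_iff _ _).mp hz x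
      rw [PySem.Set.mem_ofList, PySem.Set.mem_ofList, List.mem_singleton] at this
      exact this.mp hm
    have halls : ∀ x ∈ pvListB xs ys, x = '0' := fun x hm => hall x (hperm.mem_iff.mpr hm)
    rw [pv_pyGet?_zero hsne, pv_pyGet?_neg_one hsne]
    exact ⟨by rw [halls _ (List.getElem_mem _)], by rw [halls _ (List.getElem_mem _)]⟩
  · intro ⟨h0, h1⟩
    rw [pv_pyGet?_zero hsne] at h0
    rw [pv_pyGet?_neg_one hsne] at h1
    have h0' : (pvListB xs ys)[0]'hlp = '0' := by injection h0
    have h1' : (pvListB xs ys)[(pvListB xs ys).length - 1]'(by omega) = '0' := by injection h1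
    have halls : ∀ x ∈ pvListB xs ys, x = '0' := by
      intro x hm
      rcases List.mem_iff_getElem.mp hm with ⟨j, hj, rfl⟩
      have hle : (pvListB xs ys)[j] ≤ '0' := by
        rcases Nat.eq_zero_or_pos j with h | h
        · subst h; rw [h0']
        · rw [← h0']; exact hpw 0 j hlp hj h
      have hge : '0' ≤ (pvListB xs ys)[j] := by
        by_cases h : j = (pvListB xs ys).length - 1
        · subst h; rw [h1']
        · rw [← h1']; exact hpw j ((pvListB xs ys).length - 1) hj (by omega) (by omega)
      exact le_antisymm hle hge
    apply (PySem.Set.equal_iff _ _).mpr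
    intro x
    simp only [PySem.Set.mem_ofList, List.mem_singleton]
    constructor
    · intro hm; exact halls x (hperm.mem_iff.mp hm)
    · intro hx0
      subst hx0
      rcases List.exists_mem_of_ne_nil _ hne with ⟨x₀, hx₀⟩
      have := halls x₀ (hperm.mem_iff.mp hx₀)
      rwa [this] at hx₀

-- ===== VERDICT (by name: the statement is the Claim_ definition above) =====
theorem solution_spec : Claim_equal_solution := by
  intro X Y hdom
  unfold Spec_solution
  have hx : ∀ c ∈ X.toList, pvDomChar c = true := by
    unfold Dom_solution pvDomStr at hdom
    simp only [Bool.and_eq_true, List.all_eq_true] at hdom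
    exact fun c hc => hdom.1 c hc
  show solution X Y = solution_alt X Y
  simp only [solution, solution_alt]
  rw [pv_common_eq, pv_s_eq]
  have hperm := pv_perm X.toList Y.toList hx
  by_cases hempty : pvCommonA X.toList Y.toList = []
  · have hs : pvListB X.toList Y.toList = [] :=
      List.length_eq_zero_iff.mp (by rw [← hperm.length_eq, hempty]; rfl)
    rw [if_pos hempty, if_pos hs]
  · have hsne : pvListB X.toList Y.toList ≠ [] := by
      intro e
      exact hempty (List.length_eq_zero_iff.mp (by rw [hperm.length_eq, e]; rfl))
    rw [if_neg hempty, if_neg hsne]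
    by_cases hz : PySem.Set.equal (PySem.Set.ofList (pvCommonA X.toList Y.toList)) (PySem.Set.ofList ['0']) = true
    · rw [if_pos hz, if_pos ((pv_allzero_iff X.toList Y.toList hx hempty).mp hz)]
    · rw [if_neg hz, if_neg (fun h => hz ((pv_allzero_iff X.toList Y.toList hx hempty).mpr h))]
      rw [pv_sorted_eq_listB X.toList Y.toList hx]
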